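-- pv_equiv track=rewrite | github.com/harryprayiv/patcher | generate_xml.py | calculate_absolute_dmx_addresses
-- ===== SOURCE A (Python) =====
-- def calculate_absolute_dmx_addresses(universe, dmx_start, width, quantity):
--     patch_list = []
--     current_absolute_address = (universe - 1) * 512 + dmx_start
--
--     for _ in range(quantity):
--         dmx_channel_end = current_absolute_address + width - 1
--
--         patch_list.append((current_absolute_address, dmx_channel_end))
--         current_absolute_address = dmx_channel_end + 1
--
--     return patch_list
-- ===== SOURCE B (Python) =====
-- def calculate_absolute_dmx_addresses(universe, dmx_start, width, quantity):
--     base = (universe - 1) * 512 + dmx_start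
--     return [(base + i * width, base + i * width + width - 1) for i in range(quantity)]
-- ===== Notes on version B (the rewrite author's own statement) =====
-- stated objective: simpler
-- what changed: Replaced the threaded running-address accumulator loop with a closed-form list comprehension computing each range directly from the fixture index (base + i*width).
import Mathlib
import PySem

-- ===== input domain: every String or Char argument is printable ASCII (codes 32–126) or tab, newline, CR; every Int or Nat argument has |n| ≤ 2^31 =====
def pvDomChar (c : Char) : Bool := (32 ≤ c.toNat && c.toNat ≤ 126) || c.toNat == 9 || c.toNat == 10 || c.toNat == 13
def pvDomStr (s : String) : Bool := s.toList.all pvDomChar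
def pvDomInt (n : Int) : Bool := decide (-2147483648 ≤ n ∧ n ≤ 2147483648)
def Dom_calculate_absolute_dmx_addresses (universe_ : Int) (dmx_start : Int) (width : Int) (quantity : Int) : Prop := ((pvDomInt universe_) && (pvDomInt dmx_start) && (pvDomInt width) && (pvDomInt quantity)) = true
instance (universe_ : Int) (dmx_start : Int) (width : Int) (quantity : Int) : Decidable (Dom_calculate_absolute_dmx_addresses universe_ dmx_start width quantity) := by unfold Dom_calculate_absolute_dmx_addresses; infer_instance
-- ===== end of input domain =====

-- B replaces A's running-address accumulator loop by a closed-form per-index computation (objective: simpler).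

-- ===== PORT A =====
def calculate_absolute_dmx_addresses (universe_ : Int) (dmx_start : Int) (width : Int) (quantity : Int) : List (Int × Int) :=
  let current_absolute_address : Int := (universe_ - 1) * 512 + dmx_start
  let st := (PySem.List.pyRange 0 quantity 1).foldl
    (fun (st : List (Int × Int) × Int) (_ : Int) =>
      let dmx_channel_end := st.2 + width - 1
      (st.1 ++ [(st.2, dmx_channel_end)], dmx_channel_end + 1))
    (([] : List (Int × Int)), current_absolute_address)
  st.1

-- ===== PORT B =====
def calculate_absolute_dmx_addresses_alt (universe_ : Int) (dmx_start : Int) (width : Int) (quantity : Int) : List (Int × Int) :=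
  let base : Int := (universe_ - 1) * 512 + dmx_start
  (PySem.List.pyRange 0 quantity 1).map
    (fun i => (base + i * width, base + i * width + width - 1))

-- ===== PRECONDITION & SPEC =====
def Spec_calculate_absolute_dmx_addresses (universe_ : Int) (dmx_start : Int) (width : Int) (quantity : Int) (out : List (Int × Int)) : Prop := out = calculate_absolute_dmx_addresses_alt universe_ dmx_start width quantity
instance (universe_ : Int) (dmx_start : Int) (width : Int) (quantity : Int) (out : List (Int × Int)) : Decidable (Spec_calculate_absolute_dmx_addresses universe_ dmx_start width quantity out) := by unfold Spec_calculate_absolute_dmx_addresses; infer_instance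

-- ===== CLAIM (what is proved, stated in full; the proofs are below) =====
def Claim_equal_calculate_absolute_dmx_addresses : Prop := ∀ (universe_ : Int) (dmx_start : Int) (width : Int) (quantity : Int), Dom_calculate_absolute_dmx_addresses universe_ dmx_start width quantity → Spec_calculate_absolute_dmx_addresses universe_ dmx_start width quantity (calculate_absolute_dmx_addresses universe_ dmx_start width quantity)

-- ===== LEMMAS AND PROOFS =====

-- Loop invariant: A's fold over any list appends one closed-form range per element.
theorem dmx_fold_invariant (width : Int) (l : List Int) (acc : List (Int × Int)) (cur : Int) :
    (l.foldl
      (fun (st : List (Int × Int) × Int) (_ : Int) =>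
        let dmx_channel_end := st.2 + width - 1
        (st.1 ++ [(st.2, dmx_channel_end)], dmx_channel_end + 1))
      (acc, cur)) =
    (acc ++ (List.range l.length).map
        (fun (k : Nat) => (cur + (k : Int) * width, cur + (k : Int) * width + width - 1)),
     cur + (l.length : Int) * width) := by
  induction l generalizing acc cur with
  | nil => simp
  | cons x xs ih =>
      simp only [List.foldl_cons, List.length_cons, ih]
      rw [List.range_succ_eq_map, Prod.mk.injEq]
      refine ⟨?_, by push_cast; ring⟩
      simp only [List.map_cons, List.map_map, List.append_assoc, List.cons_append]
      congr 2
      · ring_nf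
      · apply List.map_congr_left
        intro k _
        simp only [Function.comp]
        push_cast
        refine Prod.ext ?_ ?_ <;> ring

-- ===== VERDICT (by name: the statement is the Claim_ definition above) =====
theorem calculate_absolute_dmx_addresses_spec : Claim_equal_calculate_absolute_dmx_addresses := by
  intro u d w q _
  unfold Spec_calculate_absolute_dmx_addresses
  unfold calculate_absolute_dmx_addresses calculate_absolute_dmx_addresses_alt
  simp only [dmx_fold_invariant, List.nil_append, PySem.List.pyRange_one,
    List.length_map, List.length_range, List.map_map]
  apply List.map_congr_left
  intro k _
  simp only [Function.comp]
  refine Prod.ext ?_ ?_ <;> ring
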